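-- pv_equiv track=rewrite | github.com/activetripme/tilemaker | check_mbtiles.py | get_neighbor_tiles
-- ===== SOURCE A (Python) =====
-- def get_neighbor_tiles(zoom, x, y):
--     """Get coordinates of neighboring tiles (8 neighbors + center)"""
--     tiles = []
--     for dy in [-1, 0, 1]:
--         for dx in [-1, 0, 1]:
--             nx, ny = x + dx, y + dy
--             max_coord = (1 << zoom) - 1
--             if 0 <= nx <= max_coord and 0 <= ny <= max_coord:
--                 tiles.append((zoom, nx, ny))
--     return tiles
-- ===== SOURCE B (Python) =====
-- def get_neighbor_tiles(zoom, x, y):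
--     """Get coordinates of neighboring tiles (8 neighbors + center)"""
--     max_coord = (1 << zoom) - 1
--     xlo, ylo = max(0, x - 1), max(0, y - 1)
--     w = max(0, min(max_coord, x + 1) - xlo + 1)
--     h = max(0, min(max_coord, y + 1) - ylo + 1)
--     return [(zoom, xlo + i % w, ylo + i // w) for i in range(w * h)]
-- ===== Notes on version B (the rewrite author's own statement) =====
-- stated objective: alternative
-- what changed: B replaces A's enumerate-9-offsets-and-filter double loop by computing the clamped valid rectangle once and generating the tiles in a single flat pass, decoding each row-major rank i into coordinates with divmod (xlo + i % w, ylo + i // w), with no bounds test per candidate.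
import Mathlib
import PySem

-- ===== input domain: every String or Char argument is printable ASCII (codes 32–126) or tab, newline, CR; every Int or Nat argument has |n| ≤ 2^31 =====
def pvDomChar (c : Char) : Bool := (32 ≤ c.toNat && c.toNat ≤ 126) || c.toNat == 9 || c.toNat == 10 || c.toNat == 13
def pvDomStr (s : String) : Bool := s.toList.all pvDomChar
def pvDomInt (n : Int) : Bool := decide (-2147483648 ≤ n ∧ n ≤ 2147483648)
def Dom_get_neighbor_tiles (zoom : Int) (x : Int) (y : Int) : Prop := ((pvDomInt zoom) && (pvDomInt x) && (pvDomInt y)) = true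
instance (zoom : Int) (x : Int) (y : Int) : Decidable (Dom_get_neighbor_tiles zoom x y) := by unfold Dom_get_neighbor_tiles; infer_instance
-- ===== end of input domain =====

-- B replaces A's enumerate-9-offsets-then-bounds-filter double loop by one flat pass over
-- the ranks of the clamped valid rectangle, decoding each rank with divmod (objective: alternative).

-- ===== PORT A =====
-- literal port of A; '1 << zoom' is ported as a Nat shift of zoom.toNat, exact for zoom ≥ 0
-- (Python raises ValueError for zoom < 0: excluded by Pre_).
def get_neighbor_tiles (zoom : Int) (x : Int) (y : Int) : List (Int × Int × Int) :=
  ([-1, 0, 1] : List Int).foldl (fun tiles dy =>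
    ([-1, 0, 1] : List Int).foldl (fun tiles dx =>
      let nx := x + dx
      let ny := y + dy
      let max_coord : Int := ((1 <<< zoom.toNat : Nat) : Int) - 1
      if (0 ≤ nx ∧ nx ≤ max_coord) ∧ (0 ≤ ny ∧ ny ≤ max_coord) then
        tiles ++ [(zoom, nx, ny)]
      else tiles) tiles) []

-- ===== PORT B =====
def get_neighbor_tiles_alt (zoom : Int) (x : Int) (y : Int) : List (Int × Int × Int) :=
  let max_coord : Int := ((1 <<< zoom.toNat : Nat) : Int) - 1
  let xlo := max 0 (x - 1)
  let ylo := max 0 (y - 1)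
  let w := max 0 (min max_coord (x + 1) - xlo + 1)
  let h := max 0 (min max_coord (y + 1) - ylo + 1)
  (PySem.List.pyRange 0 (w * h) 1).map (fun i =>
    (zoom, xlo + PySem.Int.mod i w, ylo + PySem.Int.floordiv i w))

-- ===== PRECONDITION & SPEC =====
-- Python's '1 << zoom' raises ValueError for zoom < 0 (in A and in B alike).
def Pre_get_neighbor_tiles (zoom : Int) (x : Int) (y : Int) : Prop := 0 ≤ zoom
instance (zoom : Int) (x : Int) (y : Int) : Decidable (Pre_get_neighbor_tiles zoom x y) := by unfold Pre_get_neighbor_tiles; infer_instance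
def pvWitness_get_neighbor_tiles : Int × Int × Int := (2, 1, 1)
def Spec_get_neighbor_tiles (zoom : Int) (x : Int) (y : Int) (out : List (Int × Int × Int)) : Prop := out = get_neighbor_tiles_alt zoom x y
instance (zoom : Int) (x : Int) (y : Int) (out : List (Int × Int × Int)) : Decidable (Spec_get_neighbor_tiles zoom x y out) := by unfold Spec_get_neighbor_tiles; infer_instance

-- ===== CLAIM (what is proved, stated in full; the proofs are below) =====
def Claim_equal_get_neighbor_tiles : Prop := ∀ (zoom : Int) (x : Int) (y : Int), Dom_get_neighbor_tiles zoom x y → Pre_get_neighbor_tiles zoom x y → Spec_get_neighbor_tiles zoom x y (get_neighbor_tiles zoom x y)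

-- ===== LEMMAS AND PROOFS =====

-- the clamped range equals the bounds-filtered 3-element candidate list (M ≥ 0)
theorem pyr3 (M t : Int) (hM : 0 ≤ M) :
    PySem.List.pyRange (max 0 (t - 1)) (min M (t + 1) + 1) 1 =
      [t - 1, t, t + 1].filter (fun v => decide (0 ≤ v ∧ v ≤ M)) := by
  by_cases h1 : 0 ≤ t - 1 ∧ t - 1 ≤ M <;>
  by_cases h2 : 0 ≤ t ∧ t ≤ M <;>
  by_cases h3 : 0 ≤ t + 1 ∧ t + 1 ≤ M <;>
  · first
    | (exfalso; omega)
    | (rw [PySem.List.pyRange_one]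
       simp only [List.filter, h1, h2, h3]
       first
       | (have h : (min M (t + 1) + 1 - max 0 (t - 1)).toNat = 0 := by omega
          rw [h]; simp <;> omega)
       | (have h : (min M (t + 1) + 1 - max 0 (t - 1)).toNat = 1 := by omega
          rw [h]; simp [List.range_succ] <;> omega)
       | (have h : (min M (t + 1) + 1 - max 0 (t - 1)).toNat = 2 := by omega
          rw [h]; simp [List.range_succ] <;> omega)
       | (have h : (min M (t + 1) + 1 - max 0 (t - 1)).toNat = 3 := by omega
          rw [h]; simp [List.range_succ] <;> omega))

-- A's nested filtered append loop as flatMap/filter/map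
theorem nested_foldl_if {α β γ : Type} (l1 : List α) (l2 : List β)
    (P : α → β → Prop) [∀ a b, Decidable (P a b)] (f : α → β → γ) (init : List γ) :
    l1.foldl (fun acc a =>
        l2.foldl (fun acc b => if P a b then acc ++ [f a b] else acc) acc) init =
      init ++ l1.flatMap (fun a => (l2.filter (fun b => decide (P a b))).map (f a)) := by
  simp only [PySem.List.foldl_append_ite]
  rw [PySem.List.foldl_append_eq_flatMap]

-- A's inner loop result, per fixed row-validity condition R
theorem inner_eq {α : Type} (x M : Int) (R : Prop) [Decidable R] (g : Int → α) :
    (([-1, 0, 1] : List Int).filter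
        (fun dx => decide ((0 ≤ x + dx ∧ x + dx ≤ M) ∧ R))).map (fun dx => g (x + dx)) =
      if R then ([x - 1, x, x + 1].filter (fun v => decide (0 ≤ v ∧ v ≤ M))).map g
      else [] := by
  have e1 : x + (-1 : Int) = x - 1 := by ring
  by_cases hR : R <;>
    (try simp [List.filter, e1, hR]) <;>
    (repeat' split) <;>
    first | rfl | (exfalso; omega) | (simp_all; omega) | simp_all

-- 'if p then g a else []' inside a flatMap is a filter
theorem flatMap_ite_filter {α γ : Type} (l : List α) (p : α → Prop) [DecidablePred p]
    (g : α → List γ) :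
    l.flatMap (fun a => if p a then g a else []) =
      (l.filter (fun a => decide (p a))).flatMap g := by
  induction l with
  | nil => simp
  | cons a l ih => by_cases h : p a <;> simp [h, ih]

-- a shifted range is the map of the shift over the 0-based range
theorem pyRange_shift (a n : Int) :
    PySem.List.pyRange a (a + n) 1 =
      (PySem.List.pyRange 0 n 1).map (fun k => a + k) := by
  rw [PySem.List.pyRange_one, PySem.List.pyRange_one]
  simp [List.map_map, Function.comp]

-- row-major rank decoding: the flat pass over range(w*h) with divmod decode equals
-- the nested row/column iteration (0 < w)
theorem decode_eq_nested {γ : Type} (w : Int) (hw : 0 < w) (h : Nat)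
    (g : Int → Int → γ) :
    (PySem.List.pyRange 0 (w * h) 1).map
        (fun i => g (PySem.Int.mod i w) (PySem.Int.floordiv i w)) =
      (PySem.List.pyRange 0 h 1).flatMap (fun r =>
        (PySem.List.pyRange 0 w 1).map (fun c => g c r)) := by
  induction h with
  | zero => simp [PySem.List.pyRange_one]
  | succ n ih =>
    have hsplit : PySem.List.pyRange 0 (w * (n + 1 : Nat)) 1 =
        PySem.List.pyRange 0 (w * n) 1 ++
          PySem.List.pyRange (w * n) (w * n + w) 1 := by
      have : (w * (n + 1 : Nat) : Int) = w * n + w := by push_cast; ring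
      rw [this]
      exact PySem.List.pyRange_one_append 0 (w * n) (w * n + w)
        (by positivity) (by omega)
    have hrow : PySem.List.pyRange 0 ((n : Int) + 1) 1 =
        PySem.List.pyRange 0 n 1 ++ [(n : Int)] :=
      PySem.List.pyRange_one_succ_right (by positivity)
    have hcast : ((n + 1 : Nat) : Int) = (n : Int) + 1 := by push_cast; ring
    rw [hsplit, List.map_append, ih, hcast, hrow, List.flatMap_append]
    congr 1
    rw [pyRange_shift (w * n) w, List.map_map]
    simp only [List.flatMap_cons, List.flatMap_nil, List.append_nil]
    apply List.map_congr_left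
    intro c hc
    have hc' := (PySem.List.mem_pyRange_one).mp hc
    have hm : PySem.Int.mod (w * n + c) w = c := by
      rw [PySem.Int.mod_eq_emod_of_pos hw,
          show w * (n : Int) + c = c + w * n from by ring,
          Int.add_mul_emod_self_left, Int.emod_eq_of_lt hc'.1 hc'.2]
    have hd : PySem.Int.floordiv (w * n + c) w = n := by
      rw [PySem.Int.floordiv_eq_ediv_of_pos hw,
          show w * (n : Int) + c = c + w * n from by ring,
          Int.add_mul_ediv_left c (n : Int) (by omega),
          Int.ediv_eq_zero_of_lt hc'.1 hc'.2]
      ring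
    simp [Function.comp, hm, hd]

theorem get_neighbor_tiles_witness_ok :
    Dom_get_neighbor_tiles pvWitness_get_neighbor_tiles.1 pvWitness_get_neighbor_tiles.2.1 pvWitness_get_neighbor_tiles.2.2 ∧
    Pre_get_neighbor_tiles pvWitness_get_neighbor_tiles.1 pvWitness_get_neighbor_tiles.2.1 pvWitness_get_neighbor_tiles.2.2 := by
  constructor <;> decide

-- ===== VERDICT (by name: the statement is the Claim_ definition above) =====
theorem get_neighbor_tiles_spec : Claim_equal_get_neighbor_tiles := by
  intro zoom x y _ _
  unfold Spec_get_neighbor_tiles get_neighbor_tiles get_neighbor_tiles_alt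
  set M : Int := ((1 <<< zoom.toNat : Nat) : Int) - 1 with hMdef
  have hM : 0 ≤ M := by
    have h1 : (1 : Nat) ≤ 1 <<< zoom.toNat := by
      rw [Nat.shiftLeft_eq]; simpa using Nat.one_le_two_pow
    omega
  dsimp only
  set xlo : Int := max 0 (x - 1) with hxlo
  set ylo : Int := max 0 (y - 1) with hylo
  set w : Int := max 0 (min M (x + 1) - xlo + 1) with hwdef
  set h : Int := max 0 (min M (y + 1) - ylo + 1) with hhdef
  -- B-side: the flat divmod pass equals the flatMap over the filtered candidate lists
  have hB : (PySem.List.pyRange 0 (w * h) 1).map (fun i =>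
        ((zoom, xlo + PySem.Int.mod i w, ylo + PySem.Int.floordiv i w) : Int × Int × Int)) =
      ([y - 1, y, y + 1].filter (fun v => decide (0 ≤ v ∧ v ≤ M))).flatMap (fun ny =>
        ([x - 1, x, x + 1].filter (fun v => decide (0 ≤ v ∧ v ≤ M))).map
          (fun nx => ((zoom, nx, ny) : Int × Int × Int))) := by
    rw [← pyr3 M x hM, ← pyr3 M y hM, ← hxlo, ← hylo]
    by_cases hw : 0 < w
    · have hxr : PySem.List.pyRange xlo (min M (x + 1) + 1) 1 =
          PySem.List.pyRange xlo (xlo + w) 1 := by congr 1; omega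
      have hyr : PySem.List.pyRange ylo (min M (y + 1) + 1) 1 =
          PySem.List.pyRange ylo (ylo + h) 1 := by
        by_cases hh : 0 < h
        · congr 1; omega
        · rw [PySem.List.pyRange_one_eq_nil (by omega),
              PySem.List.pyRange_one_eq_nil (by omega)]
      have hhn : h = ((h.toNat : Nat) : Int) := by omega
      rw [hxr, hyr, hhn, decode_eq_nested w hw h.toNat
            (fun c r => ((zoom, xlo + c, ylo + r) : Int × Int × Int)),
          pyRange_shift xlo w, pyRange_shift ylo (h.toNat)]
      simp [List.flatMap_map, List.map_map, Function.comp_def]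
    · have hw0 : w = 0 := by omega
      have hxe : PySem.List.pyRange xlo (min M (x + 1) + 1) 1 = [] :=
        PySem.List.pyRange_one_eq_nil (by omega)
      rw [hxe, hw0]
      simp [PySem.List.pyRange_one]
  rw [hB]
  -- A-side: reduce the nested filtered loop to the same flatMap form
  rw [nested_foldl_if ([-1, 0, 1] : List Int) ([-1, 0, 1] : List Int)
        (fun dy dx => (0 ≤ x + dx ∧ x + dx ≤ M) ∧ (0 ≤ y + dy ∧ y + dy ≤ M))
        (fun dy dx => (zoom, x + dx, y + dy)) [], List.nil_append]
  have hin : ∀ dy : Int, (([-1, 0, 1] : List Int).filter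
        (fun dx => decide ((0 ≤ x + dx ∧ x + dx ≤ M) ∧ (0 ≤ y + dy ∧ y + dy ≤ M)))).map
        (fun dx => (zoom, x + dx, y + dy)) =
      if (0 ≤ y + dy ∧ y + dy ≤ M) then
        ([x - 1, x, x + 1].filter (fun v => decide (0 ≤ v ∧ v ≤ M))).map
          (fun nx => ((zoom, nx, y + dy) : Int × Int × Int))
      else []
    := fun dy => inner_eq x M (0 ≤ y + dy ∧ y + dy ≤ M) (fun nx => (zoom, nx, y + dy))
  simp only [hin]
  rw [flatMap_ite_filter ([-1, 0, 1] : List Int)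
        (fun dy => 0 ≤ y + dy ∧ y + dy ≤ M)
        (fun dy => ([x - 1, x, x + 1].filter (fun v => decide (0 ≤ v ∧ v ≤ M))).map
          (fun nx => ((zoom, nx, y + dy) : Int × Int × Int)))]
  have hmap : ([-1, 0, 1] : List Int).map (fun d => y + d) = [y - 1, y, y + 1] := by
    simp only [List.map_cons, List.map_nil]
    refine congrArg₂ _ (by ring) (congrArg₂ _ (by ring) (congrArg₂ _ (by ring) rfl))
  rw [show ([y - 1, y, y + 1] : List Int) = ([-1, 0, 1] : List Int).map (fun d => y + d)
        from hmap.symm,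
      List.filter_map, List.flatMap_map]
  rfl
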